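-- pv_equiv track=rewrite | github.com/yk-ahead/code-snippet-preprocessing | java_preprocessing.py | split_identifier_into_parts
-- ===== SOURCE A (Python) =====
-- def split_camelcase(camel_case_identifier):
-- # def split_camelcase(camel_case_identifier: str) -> List[str]:
--     """
--     Split camelCase identifiers.
--     come from code transformer
--     """
--     if not len(camel_case_identifier):
--         return []
--     # split into words based on adjacent cases being the same
--     result = []
--     current = str(camel_case_identifier[0])
--     prev_upper = camel_case_identifier[0].isupper()
--     prev_digit = camel_case_identifier[0].isdigit()
--     prev_special = not camel_case_identifier[0].isalnum()
--     for c in camel_case_identifier[1:]: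
--         upper = c.isupper()
--         digit = c.isdigit()
--         special = not c.isalnum()
--         new_upper_word = upper and not prev_upper
--         new_digit_word = digit and not prev_digit
--         new_special_word = special and not prev_special
--         if new_digit_word or new_upper_word or new_special_word:
--             result.append(current)
--             current = c
--         elif not upper and prev_upper and len(current) > 1:
--             result.append(current[:-1])
--             current = current[-1] + c
--         elif not digit and prev_digit:
--             result.append(current)
--             current = c
--         elif not special and prev_special:
--             result.append(current)
--             current = c
--         else:
--             current += c
--         prev_digit = digit
--         prev_upper = upper
--         prev_special = special
--     result.append(current)
--
--
--     return result
--
-- def cap(line):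
--     # 判断一个字符串中是否包含大写字母
--     # flag = False
--     for x in line:
--         if x.isupper():
--             return True
--     return False
--
-- def split_identifier_into_parts(identifier):
--     """
--     Split a single identifier into parts on snake_case and camelCase
--     come from code transformer
--     """
--     snake_case = identifier.split("_")
--     identifier_parts = []  # type: List[str]
--     for i in range(len(snake_case)):
--
--         part = snake_case[i]
--
--         if len(part)>0:
--             if not cap(part):
--                 identifier_parts.append(part)
--             else:
--                 # identifier_parts.extend(split_camelcase(part))
--                 # identifier_parts.append(split_camelcase(part))
--                 split_parts = split_camelcase(part)
--                 lower_split_parts = [s.lower().strip() for s in split_parts]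
--                 # identifier_parts.append(s.lower() for s in split_camelcase(part))
--                 identifier_parts.extend(lower_split_parts)
--
--     return identifier_parts
-- ===== SOURCE B (Python) =====
-- def _cls(c):
--     if c.isupper():
--         return "U"
--     if c.isdigit():
--         return "D"
--     if not c.isalnum():
--         return "S"
--     return "L"
--
--
-- def split_camelcase(camel_case_identifier):
--     # Phase 1: group the string into maximal runs of the same character class.
--     runs = []
--     for c in camel_case_identifier:
--         k = _cls(c)
--         if runs and runs[-1][0] == k:
--             runs[-1] = (k, runs[-1][1] + c)
--         else:
--             runs.append((k, c))
--     # Phase 2: assemble tokens from the runs.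
--     tokens = []
--     i = 0
--     while i < len(runs):
--         k, r = runs[i]
--         if k == "U" and i + 1 < len(runs) and runs[i + 1][0] == "L":
--             if len(r) > 1:
--                 tokens.append(r[:-1])
--             tokens.append(r[-1] + runs[i + 1][1])
--             i += 2
--         else:
--             tokens.append(r)
--             i += 1
--     return tokens
--
--
-- def split_identifier_into_parts(identifier):
--     parts = []
--     for part in identifier.split("_"):
--         if not part:
--             continue
--         if any(c.isupper() for c in part):
--             parts.extend(p.lower().strip() for p in split_camelcase(part))
--         else:
--             parts.append(part)
--     return parts
-- ===== Notes on version B (the rewrite author's own statement) =====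
-- stated objective: alternative
-- what changed: split_camelcase is re-implemented in two phases — first group the string into maximal runs of the same character class (upper/digit/special/lower), then assemble tokens from the run list with the upper-run back-split and single-upper merge rules — replacing A's single stateful per-character loop with prev_upper/prev_digit/prev_special flags.
import Mathlib
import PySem

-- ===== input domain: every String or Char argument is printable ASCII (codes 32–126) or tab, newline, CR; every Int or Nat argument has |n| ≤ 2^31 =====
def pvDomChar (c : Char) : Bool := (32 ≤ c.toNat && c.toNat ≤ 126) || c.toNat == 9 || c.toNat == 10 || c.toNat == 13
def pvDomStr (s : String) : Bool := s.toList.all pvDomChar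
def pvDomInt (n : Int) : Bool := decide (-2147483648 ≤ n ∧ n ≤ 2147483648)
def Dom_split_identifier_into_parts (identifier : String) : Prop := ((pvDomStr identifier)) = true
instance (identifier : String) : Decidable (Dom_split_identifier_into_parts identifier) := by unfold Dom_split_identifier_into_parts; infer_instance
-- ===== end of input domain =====

-- B re-implements the camelCase splitter in two phases (group into maximal same-class runs,
-- then assemble tokens from the runs) instead of A's single stateful character loop; same values, alternative structure.

-- ===== PORT A =====
-- one loop step of split_camelcase: state = (result, current, prev_upper, prev_digit, prev_special)
def pvStepA (st : List (List Char) × List Char × Bool × Bool × Bool) (c : Char) :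
    List (List Char) × List Char × Bool × Bool × Bool :=
  match st with
  | (result, current, pu, pd, ps) =>
    let up := PySem.Chars.isupper c
    let dg := PySem.Chars.isdigit c
    let sp := !PySem.Chars.isalnum c
    if (dg && !pd) || (up && !pu) || (sp && !ps) then
      (result ++ [current], [c], up, dg, sp)
    else if !up && pu && decide (1 < current.length) then
      (result ++ [PySem.List.slice current none (some (-1))],
       PySem.List.slice current (some (-1)) none ++ [c], up, dg, sp)
    else if !dg && pd then
      (result ++ [current], [c], up, dg, sp)
    else if !sp && ps then
      (result ++ [current], [c], up, dg, sp)
    else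
      (result, current ++ [c], up, dg, sp)

def pvSplitCamelA (cs : List Char) : List (List Char) :=
  match cs with
  | [] => []
  | c0 :: rest =>
    let st := List.foldl pvStepA
      ([], [c0], PySem.Chars.isupper c0, PySem.Chars.isdigit c0, !PySem.Chars.isalnum c0) rest
    st.1 ++ [st.2.1]

-- cap(line): any uppercase character present (early-return loop = List.any)
def pvCap (cs : List Char) : Bool := cs.any PySem.Chars.isupper

def split_identifier_into_parts (identifier : String) : List String :=
  (List.foldl (fun acc part =>
    if 0 < part.length then
      if !pvCap part then acc ++ [part]
      else acc ++ (pvSplitCamelA part).map (fun s => PySem.Chars.strip (PySem.Chars.lower s))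
    else acc) ([] : List (List Char)) (PySem.Chars.splitOn identifier.toList ['_'])).map String.mk

-- ===== PORT B =====
-- character class: 'U' upper, 'D' digit, 'S' special (not alnum), 'L' otherwise (lowercase etc.)
def pvCls (c : Char) : Char :=
  if PySem.Chars.isupper c then 'U'
  else if PySem.Chars.isdigit c then 'D'
  else if !PySem.Chars.isalnum c then 'S'
  else 'L'

-- phase 1: group into maximal runs of the same class (Source B builds the run list left to right)
def pvRunsStep (runs : List (Char × List Char)) (c : Char) : List (Char × List Char) :=
  let k := pvCls c
  match runs.getLast? with
  | some (k', r) => if k' = k then runs.dropLast ++ [(k, r ++ [c])] else runs ++ [(k, [c])]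
  | none => [(k, [c])]

def pvRuns (cs : List Char) : List (Char × List Char) := List.foldl pvRunsStep [] cs

-- phase 2: assemble tokens from the runs
def pvAssemble : List (Char × List Char) → List (List Char)
  | [] => []
  | [(_, r)] => [r]
  | (k, r) :: (k2, r2) :: rest =>
      if k = 'U' ∧ k2 = 'L' then
        (if 1 < r.length then [r.dropLast] else []) ++
          (r.drop (r.length - 1) ++ r2) :: pvAssemble rest
      else r :: pvAssemble ((k2, r2) :: rest)

def pvSplitCamelB (cs : List Char) : List (List Char) := pvAssemble (pvRuns cs)

def split_identifier_into_parts_alt (identifier : String) : List String :=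
  ((PySem.Chars.splitOn identifier.toList ['_']).flatMap (fun part =>
    if part.isEmpty then []
    else if part.any PySem.Chars.isupper then
      (pvSplitCamelB part).map (fun s => PySem.Chars.strip (PySem.Chars.lower s))
    else [part])).map String.mk

-- ===== PRECONDITION & SPEC =====
def Spec_split_identifier_into_parts (identifier : String) (out : List String) : Prop := out = split_identifier_into_parts_alt identifier
instance (identifier : String) (out : List String) : Decidable (Spec_split_identifier_into_parts identifier out) := by unfold Spec_split_identifier_into_parts; infer_instance

-- ===== CLAIM (what is proved, stated in full; the proofs are below) =====
def Claim_equal_split_identifier_into_parts : Prop := ∀ (identifier : String), Dom_split_identifier_into_parts identifier → Spec_split_identifier_into_parts identifier (split_identifier_into_parts identifier)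

-- ===== LEMMAS AND PROOFS =====

-- character-class facts (PySem's isupper/isdigit are the ASCII ranges)
theorem pvUpper_not_digit (c : Char) (h : PySem.Chars.isupper c = true) :
    PySem.Chars.isdigit c = false := by
  simp only [PySem.Chars.isupper, PySem.Chars.isdigit, Bool.and_eq_true, decide_eq_true_eq,
    Bool.and_eq_false_iff, decide_eq_false_iff_not, Char.le_def, UInt32.le_iff_toNat_le,
    show ('A').val.toNat = 65 from rfl, show ('Z').val.toNat = 90 from rfl,
    show ('0').val.toNat = 48 from rfl, show ('9').val.toNat = 57 from rfl] at *
  omega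

theorem pvUpper_alnum (c : Char) (h : PySem.Chars.isupper c = true) :
    PySem.Chars.isalnum c = true := by
  simp [PySem.Chars.isalnum, PySem.Chars.isalpha, h]

theorem pvDigit_alnum (c : Char) (h : PySem.Chars.isdigit c = true) :
    PySem.Chars.isalnum c = true := by
  simp [PySem.Chars.isalnum, h]

-- the three per-character booleans A tracks are exactly the class comparisons
theorem pvCls_spec (c : Char) :
    PySem.Chars.isupper c = (pvCls c == 'U') ∧ PySem.Chars.isdigit c = (pvCls c == 'D') ∧
      (!PySem.Chars.isalnum c) = (pvCls c == 'S') := by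
  by_cases hu : PySem.Chars.isupper c = true
  · simp [pvCls, hu, pvUpper_not_digit c hu, pvUpper_alnum c hu]
  · by_cases hd : PySem.Chars.isdigit c = true
    · simp [pvCls, hu, hd, pvDigit_alnum c hd]
    · by_cases ha : PySem.Chars.isalnum c = true
      · simp [pvCls, hu, hd, ha]
      · simp [pvCls, hu, hd, ha]

theorem pvCls_cases (c : Char) : pvCls c = 'U' ∨ pvCls c = 'D' ∨ pvCls c = 'S' ∨ pvCls c = 'L' := by
  unfold pvCls; split_ifs <;> simp

-- recursive (front-based) description of phase 1
def pvMergeOne (p : Char × List Char) : List (Char × List Char) → List (Char × List Char)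
  | [] => [p]
  | q :: rs => if p.1 = q.1 then (p.1, p.2 ++ q.2) :: rs else p :: q :: rs

def pvRunsR : List Char → List (Char × List Char)
  | [] => []
  | c :: cs => pvMergeOne (pvCls c, [c]) (pvRunsR cs)

theorem pvRunsR_cons_head (c : Char) (cs : List Char) :
    ∃ r R, pvRunsR (c :: cs) = (pvCls c, r) :: R := by
  cases h : pvRunsR cs with
  | nil => exact ⟨[c], [], by simp [pvRunsR, h, pvMergeOne]⟩
  | cons q rs =>
      by_cases hq : pvCls c = q.1
      · exact ⟨[c] ++ q.2, rs, by simp [pvRunsR, h, pvMergeOne, hq]⟩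
      · exact ⟨[c], q :: rs, by simp [pvRunsR, h, pvMergeOne, hq]⟩

theorem pvMergeOne_ne (k : Char) (r : List Char) (c : Char) (cs : List Char) (h : k ≠ pvCls c) :
    pvMergeOne (k, r) (pvRunsR (c :: cs)) = (k, r) :: pvRunsR (c :: cs) := by
  obtain ⟨r', R, hR⟩ := pvRunsR_cons_head c cs
  rw [hR]; simp [pvMergeOne, h]

theorem pvMergeOne_merge (k : Char) (r : List Char) (c : Char) (R : List (Char × List Char)) :
    pvMergeOne (k, r) (pvMergeOne (k, [c]) R) = pvMergeOne (k, r ++ [c]) R := by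
  cases R with
  | nil => simp [pvMergeOne]
  | cons q rs => by_cases hq : k = q.1 <;> simp [pvMergeOne, hq]

theorem pvRuns_foldl (cs : List Char) : ∀ (R : List (Char × List Char)) (k : Char) (r : List Char),
    List.foldl pvRunsStep (R ++ [(k, r)]) cs = R ++ pvMergeOne (k, r) (pvRunsR cs) := by
  induction cs with
  | nil => intro R k r; simp [pvRunsR, pvMergeOne]
  | cons c cs ih =>
      intro R k r
      have hstep : pvRunsStep (R ++ [(k, r)]) c =
          if k = pvCls c then R ++ [(pvCls c, r ++ [c])]
          else (R ++ [(k, r)]) ++ [(pvCls c, [c])] := by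
        simp [pvRunsStep]
      by_cases hk : k = pvCls c
      · subst hk
        simp only [List.foldl_cons, hstep, if_true]
        rw [ih R (pvCls c) (r ++ [c])]
        have hrr : pvRunsR (c :: cs) = pvMergeOne (pvCls c, [c]) (pvRunsR cs) := rfl
        rw [hrr, pvMergeOne_merge]
      · simp only [List.foldl_cons, hstep, if_neg hk]
        rw [ih (R ++ [(k, r)]) (pvCls c) [c]]
        rw [show pvMergeOne (pvCls c, [c]) (pvRunsR cs) = pvRunsR (c :: cs) from by simp [pvRunsR]]
        rw [pvMergeOne_ne k r c cs hk]
        simp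

theorem pvRuns_eq (cs : List Char) : pvRuns cs = pvRunsR cs := by
  cases cs with
  | nil => rfl
  | cons c cs =>
      have h0 : pvRunsStep [] c = [(pvCls c, [c])] := by simp [pvRunsStep]
      have := pvRuns_foldl cs [] (pvCls c) [c]
      simp only [List.nil_append] at this
      simp only [pvRuns, List.foldl_cons, h0, this, pvRunsR]

-- tail of a nonempty list as Python's xs[-1:]
theorem pvDropPenult : ∀ (l : List Char) (h : l ≠ []), l.drop (l.length - 1) = [l.getLast h]
  | [a], _ => rfl
  | a :: b :: t, _ => by
      have ih := pvDropPenult (b :: t) (by simp)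
      simp only [List.length_cons] at *
      simpa [List.getLast] using ih

-- one step of A's loop, with the booleans rewritten to class comparisons
theorem pvStepA_eval (result : List (List Char)) (cur : List Char) (k : Char) (c : Char) :
    pvStepA (result, cur, k == 'U', k == 'D', k == 'S') c =
      if ((pvCls c == 'D') && !(k == 'D')) || ((pvCls c == 'U') && !(k == 'U'))
          || ((pvCls c == 'S') && !(k == 'S')) then
        (result ++ [cur], [c], pvCls c == 'U', pvCls c == 'D', pvCls c == 'S')
      else if !(pvCls c == 'U') && (k == 'U') && decide (1 < cur.length) then
        (result ++ [cur.dropLast], cur.drop (cur.length - 1) ++ [c],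
         pvCls c == 'U', pvCls c == 'D', pvCls c == 'S')
      else if !(pvCls c == 'D') && (k == 'D') then
        (result ++ [cur], [c], pvCls c == 'U', pvCls c == 'D', pvCls c == 'S')
      else if !(pvCls c == 'S') && (k == 'S') then
        (result ++ [cur], [c], pvCls c == 'U', pvCls c == 'D', pvCls c == 'S')
      else
        (result, cur ++ [c], pvCls c == 'U', pvCls c == 'D', pvCls c == 'S') := by
  obtain ⟨h1, h2, h3⟩ := pvCls_spec c
  have hsl1 : PySem.List.slice cur none (some (-1)) = cur.dropLast := by simp [pysem]
  have hsl2 : PySem.List.slice cur (some (-1)) none = cur.drop (cur.length - 1) := by simp [pysem]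
  simp only [pvStepA, h1, h2, h3, hsl1, hsl2]

-- the main loop invariant: A's loop from a pending token (optional single-upper prefix ++ a
-- pure run of class k, A's flags = that class) produces B's assembly of the merged run list
theorem pvMainA : ∀ (rest : List Char) (result : List (List Char)) (opt : Option Char)
    (k : Char) (run : List Char),
    run ≠ [] → (∀ c ∈ run, pvCls c = k) →
    (∀ u, opt = some u → pvCls u = 'U' ∧ k = 'L') →
    ((List.foldl pvStepA (result, opt.toList ++ run, (k == 'U'), (k == 'D'), (k == 'S')) rest).1
      ++ [(List.foldl pvStepA (result, opt.toList ++ run, (k == 'U'), (k == 'D'), (k == 'S')) rest).2.1])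
    = result ++ (match opt with
        | none => pvAssemble (pvMergeOne (k, run) (pvRunsR rest))
        | some u => pvAssemble (('U', [u]) :: pvMergeOne ('L', run) (pvRunsR rest))) := by
  intro rest
  induction rest with
  | nil =>
      intro result opt k run hne hall hopt
      cases opt with
      | none => simp [pvRunsR, pvMergeOne, pvAssemble]
      | some u => simp [pvRunsR, pvMergeOne, pvAssemble]
  | cons c rest ih =>
      intro result opt k run hne hall hopt
      have hk4 : k = 'U' ∨ k = 'D' ∨ k = 'S' ∨ k = 'L' := by
        obtain ⟨a, ha⟩ := List.exists_mem_of_ne_nil run hne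
        rw [← hall a ha]; exact pvCls_cases a
      simp only [List.foldl_cons, pvStepA_eval]
      by_cases hkk : pvCls c = k
      · -- same class: A appends c to current, B appends c to the last run
        rw [if_neg (by rw [hkk]; cases h1 : (k == 'D') <;> cases h2 : (k == 'U') <;>
              cases h3 : (k == 'S') <;> simp),
            if_neg (by rw [hkk]; cases h : (k == 'U') <;> simp),
            if_neg (by rw [hkk]; cases h : (k == 'D') <;> simp),
            if_neg (by rw [hkk]; cases h : (k == 'S') <;> simp),
            hkk, show (opt.toList ++ run) ++ [c] = opt.toList ++ (run ++ [c]) from by simp]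
        rw [ih result opt k (run ++ [c]) (by simp)
          (by intro x hx; rcases List.mem_append.1 hx with h | h
              · exact hall x h
              · simp at h; subst h; exact hkk) hopt]
        have hR : pvRunsR (c :: rest) = pvMergeOne (k, [c]) (pvRunsR rest) := by
          simp [pvRunsR, hkk]
        cases opt with
        | none => rw [hR, pvMergeOne_merge]
        | some u =>
            obtain ⟨hu, hkL⟩ := hopt u rfl
            subst hkL
            rw [hR, pvMergeOne_merge]
      · have hne' : k ≠ pvCls c := fun h => hkk h.symm
        by_cases hcL : pvCls c = 'L'
        · -- lowercase after a different class
          have hoptn : opt = none := by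
            cases opt with
            | none => rfl
            | some u =>
                exfalso; exact hne' ((hopt u rfl).2.trans hcL.symm)
          subst hoptn
          simp only [Option.toList_none, List.nil_append]
          rcases hk4 with hk | hk | hk | hk
          · -- k = 'U'
            subst hk
            by_cases hlen : 1 < run.length
            · -- back-split: the upper run gives its last character to the lowercase run
              rw [if_neg (by simp [hcL]), if_pos (by simp [hcL, hlen])]
              have hdrop := pvDropPenult run hne
              have hu0cls : pvCls (run.getLast hne) = 'U' := hall _ (List.getLast_mem hne)
              have hrec := ih (result ++ [run.dropLast]) (some (run.getLast hne)) 'L' [c]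
                (by simp) (by simpa using hcL)
                (by intro u hu; rw [Option.some_inj] at hu; subst hu; exact ⟨hu0cls, rfl⟩)
              simp only [Option.toList_some, List.singleton_append] at hrec
              rw [hdrop, show (pvCls c == 'U') = ('L' == 'U') from by rw [hcL],
                  show (pvCls c == 'D') = ('L' == 'D') from by rw [hcL],
                  show (pvCls c == 'S') = ('L' == 'S') from by rw [hcL]]
              simp only [List.singleton_append]
              rw [hrec]
              rw [pvMergeOne_ne 'U' run c rest (by rw [hcL]; decide)]
              obtain ⟨rr, R2, hRR⟩ := pvRunsR_cons_head c rest
              have hMc : pvMergeOne ('L', [c]) (pvRunsR rest) = pvRunsR (c :: rest) := by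
                simp [pvRunsR, hcL]
              rw [hMc, hRR, hcL] at *
              simp [pvAssemble, hlen, hdrop]
            · -- single uppercase letter merges into the lowercase token
              have hrun1 : run.length = 1 := by
                have := List.length_pos_of_ne_nil hne; omega
              obtain ⟨u0, hu0⟩ := List.length_eq_one_iff.1 hrun1
              subst hu0
              rw [if_neg (by simp [hcL]), if_neg (by simp),
                  if_neg (by simp [hcL]), if_neg (by simp [hcL])]
              have hu0cls : pvCls u0 = 'U' := hall u0 (by simp)
              have hrec := ih result (some u0) 'L' [c] (by simp) (by simpa using hcL)
                (by intro u hu; rw [Option.some_inj] at hu; subst hu; exact ⟨hu0cls, rfl⟩)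
              simp only [Option.toList_some, List.singleton_append] at hrec
              rw [show (pvCls c == 'U') = ('L' == 'U') from by rw [hcL],
                  show (pvCls c == 'D') = ('L' == 'D') from by rw [hcL],
                  show (pvCls c == 'S') = ('L' == 'S') from by rw [hcL]]
              simp only [List.singleton_append]
              rw [hrec]
              rw [pvMergeOne_ne 'U' [u0] c rest (by rw [hcL]; decide)]
              have hMc : pvMergeOne ('L', [c]) (pvRunsR rest) = pvRunsR (c :: rest) := by
                simp [pvRunsR, hcL]
              rw [hMc]
          · -- k = 'D'
            subst hk
            rw [if_neg (by simp [hcL]), if_neg (by simp [hcL]), if_pos (by simp [hcL])]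
            have hrec := ih (result ++ [run]) none 'L' [c] (by simp) (by simpa using hcL)
              (by intro u hu; cases hu)
            simp only [Option.toList_none, List.nil_append] at hrec
            rw [show (pvCls c == 'U') = ('L' == 'U') from by rw [hcL],
                show (pvCls c == 'D') = ('L' == 'D') from by rw [hcL],
                show (pvCls c == 'S') = ('L' == 'S') from by rw [hcL]]
            rw [hrec]
            rw [pvMergeOne_ne 'D' run c rest (by rw [hcL]; decide)]
            have hMc : pvMergeOne ('L', [c]) (pvRunsR rest) = pvRunsR (c :: rest) := by
              simp [pvRunsR, hcL]
            obtain ⟨rr, R2, hRR⟩ := pvRunsR_cons_head c rest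
            rw [hMc, hRR, hcL] at *
            simp [pvAssemble]
          · -- k = 'S'
            subst hk
            rw [if_neg (by simp [hcL]), if_neg (by simp [hcL]),
                if_neg (by simp [hcL]), if_pos (by simp [hcL])]
            have hrec := ih (result ++ [run]) none 'L' [c] (by simp) (by simpa using hcL)
              (by intro u hu; cases hu)
            simp only [Option.toList_none, List.nil_append] at hrec
            rw [show (pvCls c == 'U') = ('L' == 'U') from by rw [hcL],
                show (pvCls c == 'D') = ('L' == 'D') from by rw [hcL],
                show (pvCls c == 'S') = ('L' == 'S') from by rw [hcL]]
            rw [hrec]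
            rw [pvMergeOne_ne 'S' run c rest (by rw [hcL]; decide)]
            have hMc : pvMergeOne ('L', [c]) (pvRunsR rest) = pvRunsR (c :: rest) := by
              simp [pvRunsR, hcL]
            obtain ⟨rr, R2, hRR⟩ := pvRunsR_cons_head c rest
            rw [hMc, hRR, hcL] at *
            simp [pvAssemble]
          · subst hk; exact absurd hcL hkk
        · -- a new word of class 'U'/'D'/'S' starts
          have hcond1 : (((pvCls c == 'D') && !(k == 'D')) || ((pvCls c == 'U') && !(k == 'U'))
              || ((pvCls c == 'S') && !(k == 'S'))) = true := by
            rcases pvCls_cases c with hc | hc | hc | hc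
            · rw [hc] at hne' ⊢; simp [beq_eq_false_iff_ne.mpr hne']
            · rw [hc] at hne' ⊢; simp [beq_eq_false_iff_ne.mpr hne']
            · rw [hc] at hne' ⊢; simp [beq_eq_false_iff_ne.mpr hne']
            · exact absurd hc hcL
          rw [if_pos hcond1]
          have hrec := ih (result ++ [opt.toList ++ run]) none (pvCls c) [c] (by simp)
            (by simp) (by intro u hu; cases hu)
          simp only [Option.toList_none, List.nil_append] at hrec
          rw [hrec]
          have hfold : pvMergeOne (pvCls c, [c]) (pvRunsR rest) = pvRunsR (c :: rest) := rfl
          rw [hfold]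
          obtain ⟨rr, R2, hRR⟩ := pvRunsR_cons_head c rest
          cases opt with
          | none =>
              simp only [Option.toList_none, List.nil_append]
              rw [pvMergeOne_ne k run c rest hne', hRR]
              simp [pvAssemble, fun h : pvCls c = 'L' => hcL h]
          | some u =>
              obtain ⟨hu, hkL⟩ := hopt u rfl
              subst hkL
              simp only [Option.toList_some, List.singleton_append]
              rw [pvMergeOne_ne 'L' run c rest hne', hRR]
              simp [pvAssemble]

theorem pvCamel_eq (cs : List Char) : pvSplitCamelA cs = pvSplitCamelB cs := by
  cases cs with
  | nil => rfl
  | cons c0 rest =>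
      obtain ⟨h1, h2, h3⟩ := pvCls_spec c0
      have h := pvMainA rest [] none (pvCls c0) [c0] (by simp) (by simp)
        (by intro u hu; cases hu)
      simp only [Option.toList_none, List.nil_append] at h
      simp only [pvSplitCamelA, h1, h2, h3, h]
      have hrr : pvMergeOne (pvCls c0, [c0]) (pvRunsR rest) = pvRunsR (c0 :: rest) := rfl
      simp only [hrr, pvSplitCamelB, pvRuns_eq]

theorem pvOuter (l : List (List Char)) (acc : List (List Char)) :
    List.foldl (fun acc part =>
      if 0 < part.length then
        if !pvCap part then acc ++ [part]
        else acc ++ (pvSplitCamelA part).map (fun s => PySem.Chars.strip (PySem.Chars.lower s))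
      else acc) acc l
    = acc ++ l.flatMap (fun part =>
        if part.isEmpty then []
        else if part.any PySem.Chars.isupper then
          (pvSplitCamelB part).map (fun s => PySem.Chars.strip (PySem.Chars.lower s))
        else [part]) := by
  induction l generalizing acc with
  | nil => simp
  | cons part l ih =>
      simp only [List.foldl_cons, List.flatMap_cons, ih]
      cases part with
      | nil => simp
      | cons a t =>
          by_cases hcap : ((a :: t).any PySem.Chars.isupper) = true
          · simp [pvCap, hcap, pvCamel_eq]
          · simp [pvCap, hcap]

-- ===== VERDICT (by name: the statement is the Claim_ definition above) =====
theorem split_identifier_into_parts_spec : Claim_equal_split_identifier_into_parts := by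
  intro identifier _
  unfold Spec_split_identifier_into_parts split_identifier_into_parts split_identifier_into_parts_alt
  rw [pvOuter]
  simp
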